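-- pv_equiv track=rewrite | github.com/asdumitrescu/bluetooth-jack-audio-sync | audio_backend.py | _split_module_blocks
-- ===== SOURCE A (Python) =====
-- def _split_module_blocks(modules_output: str) -> list[str]:
--     """Split pactl list modules output into individual module blocks."""
--     blocks = []
--     current: list[str] = []
--     for line in modules_output.splitlines():
--         if line.startswith('Module #'):
--             if current:
--                 blocks.append('\n'.join(current))
--             current = [line]
--         else:
--             current.append(line)
--     if current:
--         blocks.append('\n'.join(current))
--     return blocks
-- ===== SOURCE B (Python) =====
-- def _split_module_blocks(modules_output: str) -> list[str]:
--     """Split pactl list modules output into individual module blocks."""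
--     lines = modules_output.splitlines()
--     blocks = []
--     i = 0
--     n = len(lines)
--     while i < n:
--         j = i + 1
--         while j < n and not lines[j].startswith('Module #'):
--             j += 1
--         blocks.append('\n'.join(lines[i:j]))
--         i = j
--     return blocks
-- ===== Notes on version B (the rewrite author's own statement) =====
-- stated objective: alternative
-- what changed: Replaces the accumulator state machine (blocks + current list, flushed at each boundary and at the end) by a two-pointer segment scan: each outer step finds the next 'Module #' boundary and emits one slice directly.
import Mathlib
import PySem

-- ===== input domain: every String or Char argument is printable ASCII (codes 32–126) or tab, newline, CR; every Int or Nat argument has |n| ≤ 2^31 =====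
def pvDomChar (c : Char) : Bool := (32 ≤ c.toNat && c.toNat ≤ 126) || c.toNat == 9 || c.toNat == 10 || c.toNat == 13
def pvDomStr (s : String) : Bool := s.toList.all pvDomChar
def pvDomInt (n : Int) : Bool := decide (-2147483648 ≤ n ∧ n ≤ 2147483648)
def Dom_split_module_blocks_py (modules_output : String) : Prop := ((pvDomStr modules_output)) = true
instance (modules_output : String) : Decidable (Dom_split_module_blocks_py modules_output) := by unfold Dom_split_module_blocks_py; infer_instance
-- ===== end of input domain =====

-- B is an alternative decomposition: instead of A's accumulator state machine it scans
-- boundary-to-boundary and emits one joined segment per outer step; same cost, no speed claim.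

-- ===== PORT A =====
-- line.startswith('Module #'), the boundary test both Pythons perform
def pvIsB (line : String) : Bool := PySem.Str.startswith line "Module #"

-- the fold step: one iteration of A's for-loop over (blocks, current)
def pvStepA (st : List String × List String) (line : String) : List String × List String :=
  if pvIsB line then
    (if st.2.isEmpty then st.1 else st.1 ++ [PySem.Str.join "\n" st.2], [line])
  else
    (st.1, st.2 ++ [line])

def split_module_blocks_py (modules_output : String) : List String :=
  let st := (PySem.Str.splitlines modules_output).foldl pvStepA ([], [])
  if st.2.isEmpty then st.1 else st.1 ++ [PySem.Str.join "\n" st.2]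

-- ===== PORT B =====
-- one outer-loop iteration of B: the segment is the head line plus the run of
-- non-boundary lines after it (the inner `while j < n and not startswith` scan)
def pvGoB (rest : List String) : List String :=
  match rest with
  | [] => []
  | x :: t =>
    PySem.Str.join "\n" (x :: t.takeWhile (fun l => !pvIsB l))
      :: pvGoB (t.dropWhile (fun l => !pvIsB l))
termination_by rest.length
decreasing_by
  simpa using Nat.lt_succ_of_le (List.length_dropWhile_le _ t)

def split_module_blocks_py_alt (modules_output : String) : List String :=
  pvGoB (PySem.Str.splitlines modules_output)

-- ===== PRECONDITION & SPEC =====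
def Spec_split_module_blocks_py (modules_output : String) (out : List String) : Prop := out = split_module_blocks_py_alt modules_output
instance (modules_output : String) (out : List String) : Decidable (Spec_split_module_blocks_py modules_output out) := by unfold Spec_split_module_blocks_py; infer_instance

-- ===== CLAIM (what is proved, stated in full; the proofs are below) =====
def Claim_equal_split_module_blocks_py : Prop := ∀ (modules_output : String), Dom_split_module_blocks_py modules_output → Spec_split_module_blocks_py modules_output (split_module_blocks_py modules_output)

-- ===== LEMMAS AND PROOFS =====

theorem pvGoB_nil : pvGoB [] = [] := by rw [pvGoB]

theorem pvGoB_cons (x : String) (t : List String) :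
    pvGoB (x :: t) =
      PySem.Str.join "\n" (x :: t.takeWhile (fun l => !pvIsB l))
        :: pvGoB (t.dropWhile (fun l => !pvIsB l)) := by
  rw [pvGoB]

-- the finishing step of A (the trailing `if current:` flush)
def pvFinishA (st : List String × List String) : List String :=
  if st.2.isEmpty then st.1 else st.1 ++ [PySem.Str.join "\n" st.2]

-- main invariant: with a nonempty current segment c, finishing A's fold over the
-- remaining lines yields the already-emitted blocks, then c extended with the
-- current run of non-boundary lines, then B's groups of the rest.
theorem pvFoldA_eq (lines : List String) (b c : List String) (hc : ¬ c.isEmpty) :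
    pvFinishA (lines.foldl pvStepA (b, c)) =
      b ++ [PySem.Str.join "\n" (c ++ lines.takeWhile (fun l => !pvIsB l))]
        ++ pvGoB (lines.dropWhile (fun l => !pvIsB l)) := by
  induction lines generalizing b c with
  | nil => simp [pvFinishA, hc, pvGoB_nil]
  | cons l t ih =>
    by_cases hl : pvIsB l = true
    · have h1 : pvStepA (b, c) l = (b ++ [PySem.Str.join "\n" c], [l]) := by
        simp [pvStepA, hl, hc]
      rw [List.foldl_cons, h1, ih _ [l] (by simp),
        List.takeWhile_cons_of_neg (by simp [hl]),
        List.dropWhile_cons_of_neg (by simp [hl]), pvGoB_cons]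
      simp [List.append_assoc]
    · have h1 : pvStepA (b, c) l = (b, c ++ [l]) := by simp [pvStepA, hl]
      rw [List.foldl_cons, h1, ih _ (c ++ [l]) (by simp),
        List.takeWhile_cons_of_pos (by simp [hl]),
        List.dropWhile_cons_of_pos (by simp [hl])]
      simp [List.append_assoc]

-- ===== VERDICT (by name: the statement is the Claim_ definition above) =====
theorem split_module_blocks_py_spec : Claim_equal_split_module_blocks_py := by
  intro s _
  unfold Spec_split_module_blocks_py split_module_blocks_py split_module_blocks_py_alt
  cases h : PySem.Str.splitlines s with
  | nil => simp [pvGoB_nil]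
  | cons l t =>
    have h1 : pvStepA ([], []) l = ([], [l]) := by
      by_cases hl : pvIsB l = true <;> simp [pvStepA, hl]
    show pvFinishA _ = _
    rw [List.foldl_cons, h1, pvFoldA_eq t [] [l] (by simp), pvGoB_cons]
    simp
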